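-- pv_equiv track=rewrite | github.com/themedworld/agricalcule | main.py | score_septoriose
-- ===== SOURCE A (Python) =====
-- def clamp(score):
--     return max(0, min(100, score))
--
-- def score_septoriose(hours):
--     score = 0
--     wet_hours = 0
--
--     for h in hours[:48]:
--         if 15 <= h["temp"] <= 20 and h["is_wet"]:
--             wet_hours += 1
--             score += 4
--         else:
--             wet_hours = 0
--
--         if wet_hours >= 20:
--             score += 30
--
--     return clamp(score)
-- ===== SOURCE B (Python) =====
-- def _favorable(h):
--     return 15 <= h["temp"] <= 20 and h["is_wet"]
--
--
-- def score_septoriose(hours):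
--     window = hours[:48]
--     n = len(window)
--     score = 0
--     i = 0
--     while i < n:
--         if _favorable(window[i]):
--             j = i + 1
--             while j < n and _favorable(window[j]):
--                 j += 1
--             run = j - i
--             score += 4 * run + 30 * max(0, run - 19)
--             i = j
--         else:
--             i += 1
--     return max(0, min(100, score))
-- ===== Notes on version B (the rewrite author's own statement) =====
-- stated objective: alternative
-- what changed: B segments the first 48 hours into maximal favorable runs and adds a closed-form contribution 4*L + 30*max(0, L-19) per run, instead of A's incremental streak-counter loop.
import Mathlib
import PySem

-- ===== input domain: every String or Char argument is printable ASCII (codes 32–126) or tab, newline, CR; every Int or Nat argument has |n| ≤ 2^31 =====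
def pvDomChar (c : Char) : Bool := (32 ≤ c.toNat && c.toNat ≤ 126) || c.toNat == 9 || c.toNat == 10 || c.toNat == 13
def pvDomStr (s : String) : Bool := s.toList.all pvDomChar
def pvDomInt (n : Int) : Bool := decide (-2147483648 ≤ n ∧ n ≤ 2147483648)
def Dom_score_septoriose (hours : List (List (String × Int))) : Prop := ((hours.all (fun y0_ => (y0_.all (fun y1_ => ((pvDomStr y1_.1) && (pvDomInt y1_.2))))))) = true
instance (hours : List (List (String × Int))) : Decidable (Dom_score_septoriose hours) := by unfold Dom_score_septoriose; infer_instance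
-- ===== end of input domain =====

-- B segments the first 48 hours into maximal favorable runs and scores each run by a
-- closed form 4*L + 30*max(0, L-19), instead of A's incremental streak counter (alternative decomposition, same cost).
-- Python A raises KeyError on hours missing the "temp" key (or "is_wet" when temp is favorable); Pre_ excludes those.

-- ===== PORT A =====
def pvClampA (score : Int) : Int := max 0 (min 100 score)

def pvStepA (st : Int × Int) (h : List (String × Int)) : Int × Int :=
  let st' :=
    if 15 ≤ ((h.lookup "temp").getD 0) ∧ ((h.lookup "temp").getD 0) ≤ 20 ∧
        ((h.lookup "is_wet").getD 0) ≠ 0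
    then (st.1 + 4, st.2 + 1)
    else (st.1, (0 : Int))
  if st'.2 ≥ 20 then (st'.1 + 30, st'.2) else st'

def score_septoriose (hours : List (List (String × Int))) : Int :=
  pvClampA ((PySem.List.slice hours none (some 48)).foldl pvStepA (0, 0)).1

-- ===== PORT B =====
def pvFav (h : List (String × Int)) : Bool :=
  decide (15 ≤ ((h.lookup "temp").getD 0) ∧ ((h.lookup "temp").getD 0) ≤ 20) &&
    decide (((h.lookup "is_wet").getD 0) ≠ 0)

def pvGoB : List (List (String × Int)) → Int
  | [] => 0
  | h :: t =>
    if pvFav h then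
      (4 * ((1 + (t.takeWhile pvFav).length : ℕ) : Int) +
        30 * max 0 (((1 + (t.takeWhile pvFav).length : ℕ) : Int) - 19)) +
      pvGoB (t.dropWhile pvFav)
    else pvGoB t
termination_by l => l.length
decreasing_by
  · have := List.length_dropWhile_le (p := pvFav) (l := t); simp; omega
  · simp

def score_septoriose_alt (hours : List (List (String × Int))) : Int :=
  max 0 (min 100 (pvGoB (PySem.List.slice hours none (some 48))))

-- ===== PRECONDITION & SPEC =====
-- Pre_ excludes exactly the inputs where Python A raises KeyError: an hour among the first
-- 48 without a "temp" key, or with favorable temp but no "is_wet" key.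
def Pre_score_septoriose (hours : List (List (String × Int))) : Prop :=
  ((hours.take 48).all (fun h =>
    match h.lookup "temp" with
    | none => false
    | some t => !(decide (15 ≤ t) && decide (t ≤ 20)) || (h.lookup "is_wet").isSome)) = true

instance (hours : List (List (String × Int))) : Decidable (Pre_score_septoriose hours) := by
  unfold Pre_score_septoriose; infer_instance

def pvWitness_score_septoriose : (List (List (String × Int))) :=
  [[("temp", 16), ("is_wet", 1)], [("temp", 30)]]

def Spec_score_septoriose (hours : List (List (String × Int))) (out : Int) : Prop := out = score_septoriose_alt hours
instance (hours : List (List (String × Int))) (out : Int) : Decidable (Spec_score_septoriose hours out) := by unfold Spec_score_septoriose; infer_instance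

-- ===== CLAIM (what is proved, stated in full; the proofs are below) =====
def Claim_equal_score_septoriose : Prop := ∀ (hours : List (List (String × Int))), Dom_score_septoriose hours → Pre_score_septoriose hours → Spec_score_septoriose hours (score_septoriose hours)

-- ===== LEMMAS AND PROOFS =====

-- A's loop, abstracted: score added by the remaining hours given current streak w.
def pvFA : List (List (String × Int)) → Int → Int
  | [], _ => 0
  | h :: t, w =>
    if pvFav h then (4 + (if w + 1 ≥ 20 then 30 else 0)) + pvFA t (w + 1)
    else pvFA t 0

lemma pvFav_iff (h : List (String × Int)) :
    pvFav h = true ↔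
      (15 ≤ ((h.lookup "temp").getD 0) ∧ ((h.lookup "temp").getD 0) ≤ 20 ∧
        ((h.lookup "is_wet").getD 0) ≠ 0) := by
  simp [pvFav]; tauto

lemma pv_fold_eq : ∀ (l : List (List (String × Int))) (s w : Int),
    (l.foldl pvStepA (s, w)).1 = s + pvFA l w := by
  intro l
  induction l with
  | nil => intro s w; simp [pvFA]
  | cons h t ih =>
    intro s w
    by_cases hf : pvFav h = true
    · rw [pvFav_iff] at hf
      simp only [List.foldl_cons, pvStepA, pvFA, if_pos hf, (pvFav_iff h).mpr hf, if_true]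
      by_cases hw : w + 1 ≥ 20
      · simp only [if_pos hw]; rw [ih]; ring
      · simp only [if_neg hw]; rw [ih]; ring
    · have hf' : ¬ (15 ≤ ((h.lookup "temp").getD 0) ∧ ((h.lookup "temp").getD 0) ≤ 20 ∧
          ((h.lookup "is_wet").getD 0) ≠ 0) := fun hc => hf ((pvFav_iff h).mpr hc)
      simp only [List.foldl_cons, pvStepA, pvFA, if_neg hf', hf, Bool.false_eq_true, if_false]
      norm_num
      exact ih s 0

lemma pv_run : ∀ (l : List (List (String × Int))) (w : ℕ),
    pvFA l (w : Int) =
      4 * ((l.takeWhile pvFav).length : Int) +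
        30 * ((((l.takeWhile pvFav).length - min (l.takeWhile pvFav).length (19 - w) : ℕ)) : Int) +
        pvFA (l.dropWhile pvFav) 0 := by
  intro l
  induction l with
  | nil => intro w; simp [pvFA]
  | cons h t ih =>
    intro w
    by_cases hf : pvFav h = true
    · have hcast : (w : Int) + 1 = ((w + 1 : ℕ) : Int) := by push_cast; ring
      simp only [pvFA, hf, if_true, List.takeWhile_cons, List.dropWhile_cons, hcast,
        ih (w + 1), List.length_cons]
      by_cases hw : ((w + 1 : ℕ) : Int) ≥ 20
      · simp only [if_pos hw]; omega
      · simp only [if_neg hw]; omega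
    · simp only [pvFA, hf, Bool.false_eq_true, if_false, List.takeWhile_cons,
        List.dropWhile_cons, List.length_nil]
      simp

lemma pv_fA_goB : ∀ (l : List (List (String × Int))), pvFA l 0 = pvGoB l := by
  intro l
  induction l using pvGoB.induct with
  | case1 => simp [pvFA, pvGoB]
  | case2 h t hf ih =>
    have h0 : (0 : Int) = ((0 : ℕ) : Int) := by norm_num
    rw [h0, pv_run (h :: t) 0]
    simp only [List.takeWhile_cons, hf, if_true, List.dropWhile_cons, List.length_cons]
    rw [ih]
    rw [pvGoB]
    simp only [hf, if_true]
    omega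
  | case3 h t hf ih =>
    rw [pvGoB]
    simp [pvFA, hf, ih]

-- ===== VERDICT (by name: the statement is the Claim_ definition above) =====
theorem score_septoriose_spec : Claim_equal_score_septoriose := by
  intro hours _ _
  unfold Spec_score_septoriose score_septoriose score_septoriose_alt pvClampA
  rw [pv_fold_eq, pv_fA_goB]
  norm_num
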